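-- pv_equiv track=rewrite | github.com/ausaki/data_structures_and_algorithms | leetcode/alphabet-board-path/396981084.py | alphabetBoardPath
-- ===== SOURCE A (Python) =====
-- def alphabetBoardPath(target: str) -> str:
--     m, n = 6, 5
--     result = []
--     i, j = 0, 0
--     for c in target:
--         c = ord(c) - ord('a')
--         if c == i * n + j:
--             result.append('!')
--             continue
--         ii, jj = divmod(c, n)
--         if ii > i:
--             result.append(['L', 'R'][j < jj] * abs(j - jj))
--             result.append(['U', 'D'][i < ii] * abs(i - ii))
--         else:
--             result.append(['U', 'D'][i < ii] * abs(i - ii))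
--             result.append(['L', 'R'][j < jj] * abs(j - jj))
--         i, j = ii, jj
--         result.append('!')
--     return ''.join(result)
-- ===== SOURCE B (Python) =====
-- def alphabetBoardPath(target: str) -> str:
--     out = []
--     i = j = 0
--     for c in target:
--         v = ord(c) - ord('a')
--         ti, tj = v // 5, v % 5
--         while (i, j) != (ti, tj):
--             if ti > i:
--                 if j < tj:
--                     j += 1
--                     out.append('R')
--                 elif j > tj:
--                     j -= 1
--                     out.append('L')
--                 else:
--                     i += 1
--                     out.append('D')
--             else:
--                 if i > ti:
--                     i -= 1
--                     out.append('U')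
--                 elif j < tj:
--                     j += 1
--                     out.append('R')
--                 else:
--                     j -= 1
--                     out.append('L')
--         out.append('!')
--     return ''.join(out)
-- ===== Notes on version B (the rewrite author's own statement) =====
-- stated objective: alternative
-- what changed: Replaces A's run-length segment construction (['L','R'][..]*abs(...) strings per letter) by a greedy unit-step walker: an inner while loop moves one square at a time toward each letter's cell, emitting one move character per step.
import Mathlib
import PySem

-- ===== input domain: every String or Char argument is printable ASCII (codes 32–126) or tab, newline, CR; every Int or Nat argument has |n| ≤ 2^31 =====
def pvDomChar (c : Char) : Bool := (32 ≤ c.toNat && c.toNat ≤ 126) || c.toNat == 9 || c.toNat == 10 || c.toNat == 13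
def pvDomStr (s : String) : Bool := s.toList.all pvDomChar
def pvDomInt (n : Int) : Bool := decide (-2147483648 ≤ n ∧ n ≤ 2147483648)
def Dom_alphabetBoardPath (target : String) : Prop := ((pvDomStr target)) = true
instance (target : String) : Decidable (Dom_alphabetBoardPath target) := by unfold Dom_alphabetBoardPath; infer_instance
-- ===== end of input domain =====

-- B replaces A's run-length segment construction by a greedy unit-step walker
-- (an inner while loop emitting one move character per single-square step); same output, same cost.

-- ===== PORT A =====
-- 'ch' * k for nonnegative k (Python string repetition), as a char list
def pvRep (ch : Char) (k : Int) : List Char := List.replicate k.toNat ch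

-- A's loop: state (i, j), appending pieces to 'result' (''.join = flatten)
def pvGoA : List Char → Int → Int → List (List Char)
  | [], _, _ => []
  | c :: rest, i, j =>
    let cv : Int := (c.toNat : Int) - 97
    if cv = i * 5 + j then
      ['!'] :: pvGoA rest i j
    else
      let ii := PySem.Int.floordiv cv 5
      let jj := PySem.Int.mod cv 5
      let h := pvRep (if j < jj then 'R' else 'L') (|j - jj|)
      let v := pvRep (if i < ii then 'D' else 'U') (|i - ii|)
      (if ii > i then [h, v] else [v, h]) ++ (['!'] :: pvGoA rest ii jj)

def alphabetBoardPath (target : String) : String :=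
  String.mk (pvGoA target.toList 0 0).flatten

-- ===== PORT B =====
-- B's inner while loop: step one square at a time toward (ti, tj), one move char per step.
-- Fuel = the walk's exact step count |Δrow| + |Δcol| (a pure totality guard; it never runs out).
def pvWalkGo : Nat → Int → Int → Int → Int → List Char
  | 0, _, _, _, _ => []
  | Nat.succ n, i, j, ti, tj =>
    if (i, j) = (ti, tj) then []
    else if ti > i then
      if j < tj then 'R' :: pvWalkGo n i (j + 1) ti tj
      else if j > tj then 'L' :: pvWalkGo n i (j - 1) ti tj
      else 'D' :: pvWalkGo n (i + 1) j ti tj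
    else
      if i > ti then 'U' :: pvWalkGo n (i - 1) j ti tj
      else if j < tj then 'R' :: pvWalkGo n i (j + 1) ti tj
      else 'L' :: pvWalkGo n i (j - 1) ti tj

def pvWalk (i j ti tj : Int) : List Char :=
  pvWalkGo ((ti - i).natAbs + (tj - j).natAbs) i j ti tj

-- B's outer for loop
def pvGoB : List Char → Int → Int → List Char
  | [], _, _ => []
  | c :: rest, i, j =>
    let v : Int := (c.toNat : Int) - 97
    let ti := PySem.Int.floordiv v 5
    let tj := PySem.Int.mod v 5
    pvWalk i j ti tj ++ '!' :: pvGoB rest ti tj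

def alphabetBoardPath_alt (target : String) : String :=
  String.mk (pvGoB target.toList 0 0)

-- ===== PRECONDITION & SPEC =====
def Spec_alphabetBoardPath (target : String) (out : String) : Prop := out = alphabetBoardPath_alt target
instance (target : String) (out : String) : Decidable (Spec_alphabetBoardPath target out) := by unfold Spec_alphabetBoardPath; infer_instance

-- ===== CLAIM (what is proved, stated in full; the proofs are below) =====
def Claim_equal_alphabetBoardPath : Prop := ∀ (target : String), Dom_alphabetBoardPath target → Spec_alphabetBoardPath target (alphabetBoardPath target)

-- ===== LEMMAS AND PROOFS =====

-- A's segment between consecutive cells (without the trailing '!'), for comparison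
def pvSegExp (i j ti tj : Int) : List Char :=
  if (i, j) = (ti, tj) then []
  else if ti > i then
    pvRep (if j < tj then 'R' else 'L') (|j - tj|) ++ pvRep (if i < ti then 'D' else 'U') (|i - ti|)
  else
    pvRep (if i < ti then 'D' else 'U') (|i - ti|) ++ pvRep (if j < tj then 'R' else 'L') (|j - tj|)

lemma pvRep_cons (c : Char) (a b : Int) (h : a.natAbs = b.natAbs + 1) :
    pvRep c (|a|) = c :: pvRep c (|b|) := by
  unfold pvRep; rw [Int.abs_eq_natAbs, Int.abs_eq_natAbs, Int.toNat_natCast, Int.toNat_natCast, h, List.replicate_succ]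

lemma pvRep_nil (c : Char) (a : Int) (h : a = 0) : pvRep c (|a|) = [] := by
  subst h; simp [pvRep]

lemma pvRep_shrink (c c' : Char) (a b : Int) (h1 : a.natAbs = b.natAbs + 1)
    (h2 : b ≠ 0 → c' = c) : pvRep c (|a|) = c :: pvRep c' (|b|) := by
  by_cases hb : b = 0
  · subst hb
    have ha : a.natAbs = 1 := by omega
    unfold pvRep
    rw [Int.abs_eq_natAbs, Int.toNat_natCast, ha]
    simp
  · rw [h2 hb]; exact pvRep_cons c a b h1

lemma pvWalkGo_eq (n : Nat) (i j ti tj : Int)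
    (hn : (ti - i).natAbs + (tj - j).natAbs ≤ n) :
    pvWalkGo n i j ti tj = pvSegExp i j ti tj := by
  induction n generalizing i j with
  | zero =>
    have h1 : i = ti := by omega
    have h2 : j = tj := by omega
    subst h1; subst h2
    simp [pvWalkGo, pvSegExp]
  | succ n ihn =>
    simp only [pvWalkGo]
    by_cases h : (i, j) = (ti, tj)
    · rw [if_pos h]
      simp [pvSegExp, h]
    · rw [if_neg h]
      have h' : i = ti → ¬ j = tj := by
        simp only [Prod.mk.injEq, not_and] at h; exact h
      by_cases hti : ti > i
      · rw [if_pos hti]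
        by_cases hj : j < tj
        · rw [if_pos hj, ihn i (j + 1) (by omega)]
          have h : i = ti → ¬ j = tj := h'
          unfold pvSegExp
          rw [if_neg (show ¬((i, j) = (ti, tj)) by simp only [Prod.mk.injEq, not_and]; omega),
              if_neg (show ¬((i, j + 1) = (ti, tj)) by simp only [Prod.mk.injEq, not_and]; omega),
              if_pos hti, if_pos hti, if_pos hj,
              pvRep_shrink 'R' (if j + 1 < tj then 'R' else 'L') (j - tj) (j + 1 - tj) (by omega)
                (fun hb => by rw [if_pos (show j + 1 < tj by omega)])]
          simp
          all_goals exact fun hx => absurd hx (by omega)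
        · by_cases hj2 : j > tj
          · rw [if_neg hj, if_pos hj2, ihn i (j - 1) (by omega)]
            have h : i = ti → ¬ j = tj := h'
            have hj1 : ¬ j < tj := hj
            have hj : j > tj := hj2
            unfold pvSegExp
            rw [if_neg (show ¬((i, j) = (ti, tj)) by simp only [Prod.mk.injEq, not_and]; omega),
                if_neg (show ¬((i, j - 1) = (ti, tj)) by simp only [Prod.mk.injEq, not_and]; omega),
                if_pos hti, if_pos hti, if_neg hj1,
                pvRep_shrink 'L' (if j - 1 < tj then 'R' else 'L') (j - tj) (j - 1 - tj) (by omega)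
                  (fun hb => by rw [if_neg (show ¬(j - 1 < tj) by omega)])]
            simp
            all_goals exact fun hx => absurd hx (by omega)
          · rw [if_neg hj, if_neg hj2, ihn (i + 1) j (by omega)]
            have h : i = ti → ¬ j = tj := h'
            have hj1 : ¬ j < tj := hj
            have hjt : j = tj := by omega
            unfold pvSegExp
            by_cases h2 : i + 1 = ti
            · rw [if_neg (show ¬((i, j) = (ti, tj)) by simp only [Prod.mk.injEq, not_and]; omega),
                  if_pos (show ((i + 1, j) = (ti, tj)) by simp only [Prod.mk.injEq]; omega),
                  if_pos hti, if_neg hj1, if_pos (show i < ti by omega),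
                  pvRep_nil 'L' (j - tj) (by omega),
                  pvRep_cons 'D' (i - ti) 0 (by omega), pvRep_nil 'D' 0 rfl]
              rfl
            · rw [if_neg (show ¬((i, j) = (ti, tj)) by simp only [Prod.mk.injEq, not_and]; omega),
                  if_neg (show ¬((i + 1, j) = (ti, tj)) by simp only [Prod.mk.injEq, not_and]; omega),
                  if_pos hti, if_pos (show ti > i + 1 by omega),
                  pvRep_nil _ (j - tj) (by omega),
                  if_pos (show i < ti by omega),
                  pvRep_shrink 'D' (if i + 1 < ti then 'D' else 'U') (i - ti) (i + 1 - ti) (by omega)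
                    (fun hb => by rw [if_pos (show i + 1 < ti by omega)])]
              simp
      · rw [if_neg hti]
        by_cases hi : i > ti
        · rw [if_pos hi, ihn (i - 1) j (by omega)]
          have h : i = ti → ¬ j = tj := h'
          unfold pvSegExp
          by_cases h2 : i - 1 = ti ∧ j = tj
          · rw [if_neg (show ¬((i, j) = (ti, tj)) by simp only [Prod.mk.injEq, not_and]; omega),
                if_pos (show ((i - 1, j) = (ti, tj)) by simp only [Prod.mk.injEq]; omega), if_neg hti, if_neg (show ¬(i < ti) by omega),
                pvRep_cons 'U' (i - ti) 0 (by omega), pvRep_nil 'U' 0 rfl,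
                pvRep_nil _ (j - tj) (by omega)]
            rfl
          · simp only [not_and] at h2
            rw [if_neg (show ¬((i, j) = (ti, tj)) by simp only [Prod.mk.injEq, not_and]; omega),
                if_neg (show ¬((i - 1, j) = (ti, tj)) by simp only [Prod.mk.injEq, not_and]; exact h2),
                if_neg hti, if_neg (show ¬(ti > i - 1) by omega),
                if_neg (show ¬(i < ti) by omega),
                pvRep_shrink 'U' (if i - 1 < ti then 'D' else 'U') (i - ti) (i - 1 - ti) (by omega)
                  (fun hb => by rw [if_neg (show ¬(i - 1 < ti) by omega)])]
            simp
        · have hit : i = ti := by omega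
          have hne : ¬ j = tj := h' hit
          by_cases hj : j < tj
          · rw [if_neg hi, if_pos hj, ihn i (j + 1) (by omega)]
            have h : i = ti → ¬ j = tj := h'
            have hit : i = ti := by omega
            unfold pvSegExp
            by_cases h2 : j + 1 = tj
            · rw [if_neg (show ¬((i, j) = (ti, tj)) by simp only [Prod.mk.injEq, not_and]; omega),
                  if_pos (show ((i, j + 1) = (ti, tj)) by simp only [Prod.mk.injEq]; omega),
                  if_neg hti, if_neg (show ¬(i < ti) by omega),
                  pvRep_nil 'U' (i - ti) (by omega),
                  if_pos hj, pvRep_cons 'R' (j - tj) 0 (by omega), pvRep_nil 'R' 0 rfl]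
              rfl
            · rw [if_neg (show ¬((i, j) = (ti, tj)) by simp only [Prod.mk.injEq, not_and]; omega),
                  if_neg (show ¬((i, j + 1) = (ti, tj)) by simp only [Prod.mk.injEq, not_and]; omega),
                  if_neg hti, if_neg (show ¬(ti > i) from hti),
                  pvRep_nil _ (i - ti) (by omega),
                  if_pos hj,
                  pvRep_shrink 'R' (if j + 1 < tj then 'R' else 'L') (j - tj) (j + 1 - tj) (by omega)
                    (fun hb => by rw [if_pos (show j + 1 < tj by omega)])]
              simp
          · rw [if_neg hi, if_neg hj, ihn i (j - 1) (by omega)]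
            have h : i = ti → ¬ j = tj := h'
            have hit : i = ti := by omega
            have hjt : j > tj := by omega
            unfold pvSegExp
            by_cases h2 : j - 1 = tj
            · rw [if_neg (show ¬((i, j) = (ti, tj)) by simp only [Prod.mk.injEq, not_and]; omega),
                  if_pos (show ((i, j - 1) = (ti, tj)) by simp only [Prod.mk.injEq]; omega),
                  if_neg hti, if_neg (show ¬(i < ti) by omega),
                  pvRep_nil 'U' (i - ti) (by omega),
                  if_neg hj, pvRep_cons 'L' (j - tj) 0 (by omega), pvRep_nil 'L' 0 rfl]
              rfl
            · rw [if_neg (show ¬((i, j) = (ti, tj)) by simp only [Prod.mk.injEq, not_and]; omega),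
                  if_neg (show ¬((i, j - 1) = (ti, tj)) by simp only [Prod.mk.injEq, not_and]; omega),
                  if_neg hti, if_neg (show ¬(ti > i) from hti),
                  pvRep_nil _ (i - ti) (by omega),
                  if_neg hj,
                  pvRep_shrink 'L' (if j - 1 < tj then 'R' else 'L') (j - tj) (j - 1 - tj) (by omega)
                    (fun hb => by rw [if_neg (show ¬(j - 1 < tj) by omega)])]
              simp

lemma pvWalk_eq (i j ti tj : Int) : pvWalk i j ti tj = pvSegExp i j ti tj :=
  pvWalkGo_eq _ i j ti tj le_rfl

lemma pvMod_bounds (a : Int) : 0 ≤ PySem.Int.mod a 5 ∧ PySem.Int.mod a 5 < 5 := by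
  rw [PySem.Int.mod_eq_emod_of_pos (by norm_num)]
  constructor
  · exact Int.emod_nonneg a (by norm_num)
  · exact Int.emod_lt_of_pos a (by norm_num)

lemma pvDivmod_eq_iff (cv i j : Int) (hj0 : 0 ≤ j) (hj5 : j < 5) :
    (PySem.Int.floordiv cv 5 = i ∧ PySem.Int.mod cv 5 = j) ↔ cv = i * 5 + j := by
  constructor
  · intro ⟨h1, h2⟩
    have := PySem.Int.floordiv_mul_add_mod cv 5
    rw [h1, h2] at this
    omega
  · intro h
    rw [h]
    have hd : PySem.Int.floordiv (i * 5 + j) 5 = i := by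
      rw [PySem.Int.floordiv_eq_iff_of_pos (by norm_num)]
      constructor <;> nlinarith
    have hm : PySem.Int.mod (i * 5 + j) 5 = j := by
      have := PySem.Int.floordiv_mul_add_mod (i * 5 + j) 5
      rw [hd] at this; omega
    exact ⟨hd, hm⟩

lemma pvMain (cs : List Char) (i j : Int) (hj0 : 0 ≤ j) (hj5 : j < 5) :
    (pvGoA cs i j).flatten = pvGoB cs i j := by
  induction cs generalizing i j with
  | nil => rfl
  | cons c rest ih =>
    simp only [pvGoA, pvGoB]
    obtain ⟨hm0, hm5⟩ := pvMod_bounds ((c.toNat : Int) - 97)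
    by_cases h : (c.toNat : Int) - 97 = i * 5 + j
    · obtain ⟨hd, hm⟩ := (pvDivmod_eq_iff ((c.toNat : Int) - 97) i j hj0 hj5).mpr h
      rw [if_pos h, hd, hm, pvWalk_eq]
      unfold pvSegExp
      rw [if_pos rfl]
      simp [ih i j hj0 hj5]
    · have hne : ¬((i, j) = (PySem.Int.floordiv ((c.toNat : Int) - 97) 5,
                            PySem.Int.mod ((c.toNat : Int) - 97) 5)) := by
        rw [Prod.mk.injEq]
        intro ⟨h1, h2⟩
        exact h ((pvDivmod_eq_iff _ i j hj0 hj5).mp ⟨h1.symm, h2.symm⟩)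
      rw [if_neg h, pvWalk_eq]
      unfold pvSegExp
      rw [if_neg hne]
      rw [List.flatten_append, List.flatten_cons, ih _ _ hm0 hm5]
      split_ifs <;> simp

-- ===== VERDICT (by name: the statement is the Claim_ definition above) =====
theorem alphabetBoardPath_spec : Claim_equal_alphabetBoardPath := by
  intro target _
  unfold Spec_alphabetBoardPath alphabetBoardPath alphabetBoardPath_alt
  rw [pvMain target.toList 0 0 (by norm_num) (by norm_num)]
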